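-- pv_equiv track=rewrite | github.com/SvennoNito/ScoringHero | scoring/sumo_runner.py | _extract_events_from_mask
-- ===== SOURCE A (Python) =====
-- def _extract_events_from_mask(mask):
--     """Extract [start, end] sample indices from binary mask."""
--     events = []
--     in_event = False
--     start = 0
--
--     for i, is_spindle in enumerate(mask):
--         if is_spindle and not in_event:
--             start = i
--             in_event = True
--         elif not is_spindle and in_event:
--             events.append([start, i - 1])
--             in_event = False
--
--     if in_event:
--         events.append([start, len(mask) - 1])
--
--     return events
-- ===== SOURCE B (Python) =====
-- def _runs(mask):
--     """Split mask into maximal runs of equal truthiness: list of (key, length)."""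
--     groups = []
--     n = len(mask)
--     start = 0
--     while start < n:
--         key = bool(mask[start])
--         end = start + 1
--         while end < n and bool(mask[end]) == key:
--             end += 1
--         groups.append((key, end - start))
--         start = end
--     return groups
--
--
-- def _extract_events_from_mask(mask):
--     """Extract [start, end] sample indices from binary mask."""
--     events = []
--     offset = 0
--     for key, length in _runs(mask):
--         if key:
--             events.append([offset, offset + length - 1])
--         offset += length
--     return events
-- ===== Notes on version B (the rewrite author's own statement) =====
-- stated objective: alternative
-- what changed: Replaces A's in_event/start flag state machine with a run-grouping decomposition: the mask is first split into maximal runs of equal truthiness, then a fold over the runs with a running offset emits [offset, offset+len-1] for each truthy run.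
import Mathlib
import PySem

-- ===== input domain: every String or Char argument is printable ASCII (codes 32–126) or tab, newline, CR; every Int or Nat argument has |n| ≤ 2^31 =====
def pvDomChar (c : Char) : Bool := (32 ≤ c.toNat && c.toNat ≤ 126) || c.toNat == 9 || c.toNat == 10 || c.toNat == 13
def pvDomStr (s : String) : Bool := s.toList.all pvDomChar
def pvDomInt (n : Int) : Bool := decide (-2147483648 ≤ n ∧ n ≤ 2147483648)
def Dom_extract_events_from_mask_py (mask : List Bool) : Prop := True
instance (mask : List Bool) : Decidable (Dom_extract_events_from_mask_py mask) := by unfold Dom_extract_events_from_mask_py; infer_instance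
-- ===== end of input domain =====

-- B replaces A's in_event/start flag state machine by a run-grouping decomposition
-- (split the mask into maximal runs, then fold over the runs with an offset); same O(n) cost.

-- ===== PORT A =====
-- the 'for i, is_spindle in enumerate(mask)' loop, carrying (events, in_event, start) and the index i
def loopA : List Bool → Int → List (List Int) → Bool → Int → List (List Int) × Bool × Int
  | [], _, events, in_event, start => (events, in_event, start)
  | is_spindle :: rest, i, events, in_event, start =>
    if is_spindle && !in_event then loopA rest (i + 1) events true i
    else if !is_spindle && in_event then loopA rest (i + 1) (events ++ [[start, i - 1]]) false start
    else loopA rest (i + 1) events in_event start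

def extract_events_from_mask_py (mask : List Bool) : List (List Int) :=
  let r := loopA mask 0 [] false 0
  if r.2.1 then r.1 ++ [[r.2.2, (mask.length : Int) - 1]] else r.1

-- ===== PORT B =====
-- helper needed by runsB's termination proof: the inner while loop never moves 'end' backwards
def runInner (mask : List Bool) (key : Bool) (endI : Nat) : Nat :=
  -- 'while end < n and bool(mask[end]) == key: end += 1'
  if h : endI < mask.length then
    (if mask[endI] == key then runInner mask key (endI + 1) else endI)
  else endI
termination_by mask.length - endI

theorem runInner_ge (mask : List Bool) (key : Bool) (j : Nat) : j ≤ runInner mask key j := by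
  rw [runInner]
  split
  · split
    · have := runInner_ge mask key (j + 1); omega
    · exact le_refl j
  · exact le_refl j
termination_by mask.length - j

-- _runs: 'while start < n' outer loop, emitting (key, end - start) per maximal run
def runsB (mask : List Bool) (start : Nat) : List (Bool × Nat) :=
  if h : start < mask.length then
    (mask[start], runInner mask mask[start] (start + 1) - start)
      :: runsB mask (runInner mask mask[start] (start + 1))
  else []
termination_by mask.length - start
decreasing_by have := runInner_ge mask mask[start] (start + 1); omega

def extract_events_from_mask_py_alt (mask : List Bool) : List (List Int) :=
  -- 'for key, length in _runs(mask)' with running offset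
  ((runsB mask 0).foldl
    (fun (acc : List (List Int) × Int) (g : Bool × Nat) =>
      if g.1 then (acc.1 ++ [[acc.2, acc.2 + (g.2 : Int) - 1]], acc.2 + (g.2 : Int))
      else (acc.1, acc.2 + (g.2 : Int)))
    ([], 0)).1

-- ===== PRECONDITION & SPEC =====
def Spec_extract_events_from_mask_py (mask : List Bool) (out : List (List Int)) : Prop := out = extract_events_from_mask_py_alt mask
instance (mask : List Bool) (out : List (List Int)) : Decidable (Spec_extract_events_from_mask_py mask out) := by unfold Spec_extract_events_from_mask_py; infer_instance

-- ===== CLAIM (what is proved, stated in full; the proofs are below) =====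
def Claim_equal_extract_events_from_mask_py : Prop := ∀ (mask : List Bool), Dom_extract_events_from_mask_py mask → Spec_extract_events_from_mask_py mask (extract_events_from_mask_py mask)

-- ===== LEMMAS AND PROOFS =====

-- proof-side takeWhile/dropWhile characterisation of _runs
def runsSpec : List Bool → List (Bool × Nat)
  | [] => []
  | key :: t =>
    let i := 1 + (t.takeWhile (· == key)).length
    (key, i) :: runsSpec ((key :: t).drop i)
termination_by mask => mask.length
decreasing_by simp

-- proof-side structural version of B's fold over the runs
def gor : List (Bool × Nat) → Int → List (List Int)
  | [], _ => []
  | (b, n) :: rs, off =>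
    if b then [off, off + (n : Int) - 1] :: gor rs (off + (n : Int)) else gor rs (off + (n : Int))

-- flush at the end of A's loop, with n = len(mask)
def finA (r : List (List Int) × Bool × Int) (n : Int) : List (List Int) :=
  if r.2.1 then r.1 ++ [[r.2.2, n - 1]] else r.1

theorem foldl_gor (rs : List (Bool × Nat)) : ∀ (ev : List (List Int)) (off : Int),
    (rs.foldl
      (fun (acc : List (List Int) × Int) (g : Bool × Nat) =>
        if g.1 then (acc.1 ++ [[acc.2, acc.2 + (g.2 : Int) - 1]], acc.2 + (g.2 : Int))
        else (acc.1, acc.2 + (g.2 : Int)))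
      (ev, off)).1 = ev ++ gor rs off := by
  induction rs with
  | nil => intro ev off; simp [gor]
  | cons g rs ih =>
    intro ev off
    obtain ⟨b, n⟩ := g
    by_cases hb : b <;> simp [gor, hb, List.foldl_cons, ih]

theorem drop_takeWhile_len (p : Bool → Bool) : ∀ (t : List Bool),
    t.drop (t.takeWhile p).length = t.dropWhile p := by
  intro t
  induction t with
  | nil => rfl
  | cons a t ih =>
    by_cases h : p a <;> simp [List.takeWhile_cons, List.dropWhile_cons, h, ih]

theorem drop_one_add (k : Nat) (a : Bool) (t : List Bool) : (a :: t).drop (1 + k) = t.drop k := by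
  rw [Nat.add_comm]; exact List.drop_succ_cons

theorem runsSpec_nil : runsSpec [] = [] := by rw [runsSpec.eq_def]

theorem runsSpec_cons (key : Bool) (t : List Bool) :
    runsSpec (key :: t) = (key, 1 + (t.takeWhile (· == key)).length) :: runsSpec (t.dropWhile (· == key)) := by
  rw [runsSpec.eq_def]
  simp only [drop_one_add, drop_takeWhile_len]

theorem gor_skip_false (t : List Bool) (i : Int) :
    gor (runsSpec t) i
      = gor (runsSpec (t.dropWhile (· == false))) (i + ((t.takeWhile (· == false)).length : Int)) := by
  cases t with
  | nil => simp [runsSpec_nil]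
  | cons b t =>
    cases b with
    | true => simp [List.takeWhile_cons, List.dropWhile_cons]
    | false =>
      rw [runsSpec_cons]
      simp [gor, List.takeWhile_cons, List.dropWhile_cons]
      ring_nf

theorem main_inv (t : List Bool) :
    (∀ (i : Int) (ev : List (List Int)) (st : Int),
      finA (loopA t i ev false st) (i + (t.length : Int)) = ev ++ gor (runsSpec t) i)
    ∧ (∀ (i : Int) (ev : List (List Int)) (st : Int),
      finA (loopA t i ev true st) (i + (t.length : Int))
        = ev ++ [st, i + ((t.takeWhile (· == true)).length : Int) - 1]
             :: gor (runsSpec (t.dropWhile (· == true))) (i + ((t.takeWhile (· == true)).length : Int))) := by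
  induction t with
  | nil =>
    constructor
    · intro i ev st; simp [loopA, finA, runsSpec_nil, gor]
    · intro i ev st; simp [loopA, finA, runsSpec_nil, gor]
  | cons b t ih =>
    obtain ⟨ihf, iht⟩ := ih
    constructor
    · intro i ev st
      cases b with
      | true =>
        rw [runsSpec_cons]
        have h := iht (i + 1) ev i
        simp [loopA, gor] at h ⊢
        rw [show (i + ((t.length : Int) + 1)) = (i + 1 + (t.length : Int)) by ring, h]
        ring_nf
      | false =>
        have h := ihf (i + 1) ev st
        simp [loopA] at h ⊢
        rw [show (i + ((t.length : Int) + 1)) = (i + 1 + (t.length : Int)) by ring, h]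
        rw [gor_skip_false t (i + 1), runsSpec_cons]
        simp [gor, List.takeWhile_cons, List.dropWhile_cons]
        congr 1
        ring
    · intro i ev st
      cases b with
      | true =>
        have h := iht (i + 1) ev st
        simp [loopA, List.takeWhile_cons, List.dropWhile_cons] at h ⊢
        rw [show (i + ((t.length : Int) + 1)) = (i + 1 + (t.length : Int)) by ring, h]
        ring_nf
      | false =>
        have h := ihf (i + 1) (ev ++ [[st, i - 1]]) st
        simp [loopA, List.takeWhile_cons, List.dropWhile_cons] at h ⊢
        rw [show (i + ((t.length : Int) + 1)) = (i + 1 + (t.length : Int)) by ring, h]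
        rw [gor_skip_false t (i + 1)]
        rw [gor_skip_false (false :: t) i]
        simp [List.takeWhile_cons, List.dropWhile_cons]
        congr 1
        ring


theorem runInner_eq (mask : List Bool) (key : Bool) (j : Nat) :
    runInner mask key j = j + ((mask.drop j).takeWhile (· == key)).length := by
  rw [runInner]
  split
  · rename_i h
    by_cases hk : (mask[j] == key) = true
    · rw [if_pos hk, runInner_eq mask key (j + 1),
        List.drop_eq_getElem_cons h, List.takeWhile_cons, if_pos hk]
      simp
      omega
    · rw [if_neg hk, List.drop_eq_getElem_cons h, List.takeWhile_cons, if_neg hk]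
      simp
  · rename_i h
    rw [List.drop_eq_nil_of_le (by omega)]
    simp
termination_by mask.length - j

theorem runsB_eq (mask : List Bool) (start : Nat) :
    runsB mask start = runsSpec (mask.drop start) := by
  rw [runsB]
  split
  · rename_i h
    rw [List.drop_eq_getElem_cons h, runsSpec_cons,
      runsB_eq mask (runInner mask mask[start] (start + 1)),
      runInner_eq mask mask[start] (start + 1)]
    congr 1
    · congr 1
      omega
    · congr 1
      rw [← List.drop_drop, drop_takeWhile_len]
  · rename_i h
    rw [List.drop_eq_nil_of_le (by omega), runsSpec_nil]
termination_by mask.length - start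
decreasing_by have := runInner_ge mask mask[start] (start + 1); omega

-- ===== VERDICT (by name: the statement is the Claim_ definition above) =====
theorem extract_events_from_mask_py_spec : Claim_equal_extract_events_from_mask_py := by
  intro mask _
  unfold Spec_extract_events_from_mask_py extract_events_from_mask_py extract_events_from_mask_py_alt
  have h := (main_inv mask).1 0 [] 0
  simp only [zero_add] at h
  rw [show (if (loopA mask 0 [] false 0).2.1 then (loopA mask 0 [] false 0).1 ++ [[(loopA mask 0 [] false 0).2.2, (mask.length : Int) - 1]] else (loopA mask 0 [] false 0).1) = finA (loopA mask 0 [] false 0) (mask.length : Int) from rfl]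
  rw [h, foldl_gor, runsB_eq]
  simp
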